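-- pv_equiv track=rewrite | github.com/DongHun-Lee-96/cuk_chatbot_report | levenshtein_distance.py | calculate_lev_distance
-- ===== SOURCE A (Python) =====
-- def calculate_lev_distance(input_sentence, questions_set):
--     similarities = []
--
--     for question in questions_set:
--         if input_sentence == question:
--             similarities.append(0) # 같으면 0으로 유사도 지정
--         else:
--             input_sentence_len = len(input_sentence) # 사용자 입력 질문 길이
--             question_len = len(question) # 질문 셋의 길이
--
--             matrix = [[] for i in range(input_sentence_len+1)] # 리스트 컴프리헨션을 사용하여 1차원 초기화
--             for i in range(input_sentence_len+1): # 0으로 초기화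
--                 matrix[i] = [0 for j in range(question_len+1)]  # 리스트 컴프리헨션을 사용하여 2차원 초기화
--
--             # 0일 때 초깃값을 설정
--             for i in range(input_sentence_len+1):
--                 matrix[i][0] = i
--             for j in range(question_len+1):
--                 matrix[0][j] = j
--
--             # 문장의 한 글자씩 비교
--             for i in range(1, input_sentence_len+1):
--                 input_sentence_letter = input_sentence[i-1]
--                 for j in range(1, question_len+1):
--                     possible_answer_letter = question[j-1]
--                     cost = 0 if (input_sentence_letter == possible_answer_letter) else 1
--
--                     matrix[i][j] = min([
--                         matrix[i-1][j] + 1,     # 문자 제거는 위쪽에서 +1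
--                         matrix[i][j-1] + 1,     # 문자 삽입은 왼쪽 수에서 +1
--                         matrix[i-1][j-1] + cost # 문자 변경은 대각선에서 +1 동일하면 대각선 숫자 복사
--                     ])
--             # 유사도를 리스트에 저장
--             similarities.append(matrix[input_sentence_len][question_len])
--
--     return similarities
-- ===== SOURCE B (Python) =====
-- def calculate_lev_distance(input_sentence, questions_set):
--     # Anti-diagonal dynamic programming: sweep diagonals d = i + j, keeping only the
--     # last two diagonals (as dicts keyed by i) instead of A's full (m+1)x(n+1) matrix.
--     def distance(s, t):
--         m, n = len(s), len(t)
--         prev2, prev1 = {}, {}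
--         for d in range(m + n + 1):
--             lo = d - n if d > n else 0
--             hi = d if d < m else m
--             cur = {}
--             for i in range(lo, hi + 1):
--                 j = d - i
--                 if i == 0:
--                     cur[i] = j
--                 elif j == 0:
--                     cur[i] = i
--                 else:
--                     cost = 0 if s[i - 1] == t[j - 1] else 1
--                     cur[i] = min(min(prev1[i - 1] + 1, prev1[i] + 1), prev2[i - 1] + cost)
--             prev2, prev1 = prev1, cur
--         return prev1[m]
--
--     return [distance(input_sentence, q) for q in questions_set]
-- ===== Notes on version B (the rewrite author's own statement) =====
-- stated objective: alternative
-- what changed: Replaces A's full (m+1)x(n+1) bottom-up matrix (four separate initialisation/fill loops with in-place cell assignment) by an anti-diagonal sweep d = i+j that keeps only the last two diagonals as dicts keyed by i, and drops the special-cased equality shortcut since equal strings already yield distance 0.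
import Mathlib
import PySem

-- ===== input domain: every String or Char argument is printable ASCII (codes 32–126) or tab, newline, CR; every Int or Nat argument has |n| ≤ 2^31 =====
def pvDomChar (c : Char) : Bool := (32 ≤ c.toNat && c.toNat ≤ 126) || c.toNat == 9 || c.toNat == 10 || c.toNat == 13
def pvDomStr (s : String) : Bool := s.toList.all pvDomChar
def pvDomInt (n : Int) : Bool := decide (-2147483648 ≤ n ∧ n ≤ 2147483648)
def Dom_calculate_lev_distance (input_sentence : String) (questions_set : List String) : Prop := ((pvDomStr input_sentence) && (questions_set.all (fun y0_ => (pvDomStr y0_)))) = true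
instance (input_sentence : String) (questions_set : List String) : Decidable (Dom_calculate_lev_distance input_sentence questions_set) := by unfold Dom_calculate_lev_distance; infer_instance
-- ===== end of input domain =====

-- B replaces A's full DP matrix by an anti-diagonal sweep keeping only two diagonals
-- (objective: alternative algorithm of the same cost, O(min(m,n)) extra space).
-- Equivalence of the RETURN values is proved on the whole domain; neither side mutates its arguments.

-- ===== PORT A =====
-- Per-question body of A's else-branch (the matrix DP), transliterated loop by loop;
-- Python's in-range indices matrix[i][j] / s[i-1] are read with getD (always in range here).
def pvLevMatrix (s t : List Char) : Int :=
  let input_sentence_len := s.length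
  let question_len := t.length
  -- matrix = [[] for i in range(input_sentence_len+1)]
  let matrix : List (List Int) := (List.range (input_sentence_len + 1)).map (fun _ => ([] : List Int))
  -- for i in range(input_sentence_len+1): matrix[i] = [0 for j in range(question_len+1)]
  let matrix := (List.range (input_sentence_len + 1)).foldl
    (fun mat i => mat.set i ((List.range (question_len + 1)).map (fun _ => (0 : Int)))) matrix
  -- for i in range(input_sentence_len+1): matrix[i][0] = i
  let matrix := (List.range (input_sentence_len + 1)).foldl
    (fun mat i => mat.set i ((mat.getD i []).set 0 (i : Int))) matrix
  -- for j in range(question_len+1): matrix[0][j] = j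
  let matrix := (List.range (question_len + 1)).foldl
    (fun mat j => mat.set 0 ((mat.getD 0 []).set j (j : Int))) matrix
  -- for i in range(1, input_sentence_len+1): … for j in range(1, question_len+1): …
  let matrix := (List.range' 1 input_sentence_len).foldl
    (fun mat i =>
      let input_sentence_letter := s.getD (i - 1) ' '
      (List.range' 1 question_len).foldl
        (fun mat j =>
          let possible_answer_letter := t.getD (j - 1) ' '
          let cost : Int := if input_sentence_letter == possible_answer_letter then 0 else 1
          mat.set i ((mat.getD i []).set j
            (min (min ((mat.getD (i - 1) []).getD j 0 + 1)
                      ((mat.getD i []).getD (j - 1) 0 + 1))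
                 ((mat.getD (i - 1) []).getD (j - 1) 0 + cost)))) mat) matrix
  (matrix.getD input_sentence_len []).getD question_len 0

def calculate_lev_distance (input_sentence : String) (questions_set : List String) : List Int :=
  questions_set.foldl
    (fun similarities question =>
      if input_sentence == question then similarities ++ [(0 : Int)]
      else similarities ++ [pvLevMatrix input_sentence.toList question.toList])
    []

-- ===== PORT B =====
-- Per-question body of B: anti-diagonal sweep; the two live diagonals are dicts keyed by i.
def pvLevDiag (s t : List Char) : Int :=
  let m := s.length
  let n := t.length
  let st := (List.range (m + n + 1)).foldl
    (fun (st : PySem.Dict Nat Int × PySem.Dict Nat Int) d =>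
      let prev2 := st.1
      let prev1 := st.2
      let lo := d - n           -- "d - n if d > n else 0": Nat subtraction truncates at 0
      let hi := min d m        -- "d if d < m else m"
      let cur := (List.range' lo (hi + 1 - lo)).foldl
        (fun cur i =>
          let j := d - i
          if i = 0 then cur.insert i ((j : Nat) : Int)
          else if j = 0 then cur.insert i ((i : Nat) : Int)
          else
            let cost : Int := if s.getD (i - 1) ' ' == t.getD (j - 1) ' ' then 0 else 1
            cur.insert i (min (min (prev1.getD (i - 1) 0 + 1) (prev1.getD i 0 + 1))
                              (prev2.getD (i - 1) 0 + cost)))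
        PySem.Dict.empty
      (prev1, cur))
    (PySem.Dict.empty, PySem.Dict.empty)
  st.2.getD m 0

def calculate_lev_distance_alt (input_sentence : String) (questions_set : List String) : List Int :=
  questions_set.map (fun question => pvLevDiag input_sentence.toList question.toList)

-- ===== PRECONDITION & SPEC =====
def Spec_calculate_lev_distance (input_sentence : String) (questions_set : List String) (out : List Int) : Prop := out = calculate_lev_distance_alt input_sentence questions_set
instance (input_sentence : String) (questions_set : List String) (out : List Int) : Decidable (Spec_calculate_lev_distance input_sentence questions_set out) := by unfold Spec_calculate_lev_distance; infer_instance

-- ===== CLAIM (what is proved, stated in full; the proofs are below) =====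
def Claim_equal_calculate_lev_distance : Prop := ∀ (input_sentence : String) (questions_set : List String), Dom_calculate_lev_distance input_sentence questions_set → Spec_calculate_lev_distance input_sentence questions_set (calculate_lev_distance input_sentence questions_set)

-- ===== LEMMAS AND PROOFS =====

-- The mathematical Levenshtein prefix distance both ports compute: pvLev s t i j is the
-- edit distance between the first i chars of s and the first j chars of t.
def pvLev (s t : List Char) : Nat → Nat → Int
  | 0, j => (j : Int)
  | i + 1, 0 => ((i : Int) + 1)
  | i + 1, j + 1 =>
    min (min (pvLev s t i (j + 1) + 1) (pvLev s t (i + 1) j + 1))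
        (pvLev s t i j + (if s.getD i ' ' == t.getD j ' ' then 0 else 1))
  termination_by i j => (i, j)

lemma pvLev_zero_left (s t : List Char) (j : Nat) : pvLev s t 0 j = (j : Int) := by
  cases j <;> simp [pvLev]

lemma pvLev_zero_right (s t : List Char) (i : Nat) : pvLev s t i 0 = (i : Int) := by
  cases i <;> simp [pvLev]

lemma pvLev_succ (s t : List Char) (i j : Nat) :
    pvLev s t (i + 1) (j + 1) =
      min (min (pvLev s t i (j + 1) + 1) (pvLev s t (i + 1) j + 1))
          (pvLev s t i j + (if s.getD i ' ' == t.getD j ' ' then 0 else 1)) := by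
  simp [pvLev]

lemma pvLev_nonneg (s t : List Char) : ∀ N i j, i + j ≤ N → 0 ≤ pvLev s t i j := by
  intro N
  induction N with
  | zero =>
    intro i j h
    obtain ⟨rfl, rfl⟩ : i = 0 ∧ j = 0 := by omega
    simp [pvLev]
  | succ N ih =>
    intro i j h
    match i, j with
    | 0, j => simp [pvLev_zero_left]
    | i + 1, 0 => simp [pvLev_zero_right]; omega
    | i + 1, j + 1 =>
      rw [pvLev_succ]
      have h1 := ih i (j + 1) (by omega)
      have h2 := ih (i + 1) j (by omega)
      have h3 := ih i j (by omega)
      have hc : (0 : Int) ≤ (if s.getD i ' ' == t.getD j ' ' then 0 else 1) := by positivity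
      exact le_min (le_min (by omega) (by omega)) (by omega)

lemma pvLev_self (s : List Char) : ∀ i, pvLev s s i i = 0 := by
  intro i
  induction i with
  | zero => simp [pvLev_zero_left]
  | succ i ih =>
    rw [pvLev_succ, ih]
    have h1 := pvLev_nonneg s s (i + (i + 1)) i (i + 1) le_rfl
    have h2 := pvLev_nonneg s s ((i + 1) + i) (i + 1) i le_rfl
    simp only [beq_self_eq_true, if_true, add_zero]
    omega

-- set on a map-over-range list, as pointwise overwrite
lemma pvSet_map_range {α : Type} (f : Nat → α) (K r : Nat) (v : α) (_h : r < K) :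
    ((List.range K).map f).set r v = (List.range K).map (fun x => if x = r then v else f x) := by
  apply List.ext_getElem (by simp)
  intro k h1 h2
  simp only [List.length_map, List.length_range] at h1 h2
  rw [List.getElem_set, List.getElem_map, List.getElem_map, List.getElem_range]
  by_cases h3 : r = k
  · rw [if_pos h3, if_pos h3.symm]
  · rw [if_neg h3, if_neg (fun h => h3 h.symm)]

lemma pvGetD_map_range {α : Type} (f : Nat → α) (K r : Nat) (d : α) (h : r < K) :
    (((List.range K).map f).getD r d) = f r := by
  rw [List.getD_eq_getElem?_getD]
  simp [h]

-- ---------- A side: the four loops, characterised phase by phase ----------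

-- the value rows hold during the main loop, column-truncated at k
def pvRowA (s t : List Char) (i k : Nat) : List Int :=
  (List.range (t.length + 1)).map (fun j => if j ≤ k then pvLev s t i j else 0)

def pvInitRow (n i : Nat) : List Int :=
  (List.range (n + 1)).map (fun j => if j = 0 then (i : Int) else 0)

-- matrix state after the outer loop has finished rows 1..i
def pvMatA (s t : List Char) (i : Nat) : List (List Int) :=
  (List.range (s.length + 1)).map
    (fun r => if r ≤ i then (List.range (t.length + 1)).map (pvLev s t r) else pvInitRow t.length r)

-- matrix state inside the inner loop of row i, columns 1..k done
def pvInnerA (s t : List Char) (i k : Nat) : List (List Int) :=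
  (List.range (s.length + 1)).map
    (fun r => if r < i then (List.range (t.length + 1)).map (pvLev s t r)
              else if r = i then pvRowA s t i k else pvInitRow t.length r)

lemma pvPhase1 (m n : Nat) : ∀ c k, k + c = m + 1 →
    (List.range' k c).foldl (fun mat i => mat.set i ((List.range (n + 1)).map (fun _ => (0 : Int))))
      ((List.range (m + 1)).map (fun r => if r < k then (List.range (n + 1)).map (fun _ => (0 : Int)) else ([] : List Int)))
    = (List.range (m + 1)).map (fun _ => (List.range (n + 1)).map (fun _ => (0 : Int))) := by
  intro c
  induction c with
  | zero =>
    intro k hk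
    simp only [List.range'_zero, List.foldl_nil]
    apply List.map_congr_left
    intro x hx
    rw [List.mem_range] at hx
    simp [show x < k by omega]
  | succ c ih =>
    intro k hk
    rw [List.range'_succ, List.foldl_cons, pvSet_map_range _ _ _ _ (by omega)]
    have : ((List.range (m + 1)).map fun x =>
        if x = k then (List.range (n + 1)).map (fun _ => (0 : Int))
        else if x < k then (List.range (n + 1)).map (fun _ => (0 : Int)) else ([] : List Int))
      = (List.range (m + 1)).map (fun r => if r < k + 1 then (List.range (n + 1)).map (fun _ => (0 : Int)) else ([] : List Int)) := by
      apply List.map_congr_left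
      intro x hx
      by_cases h1 : x = k <;> by_cases h2 : x < k <;> simp [h1, h2] <;> omega
    rw [this, ih (k + 1) (by omega)]

lemma pvPhase2 (m n : Nat) : ∀ c k, k + c = m + 1 →
    (List.range' k c).foldl (fun mat i => mat.set i ((mat.getD i []).set 0 (i : Int)))
      ((List.range (m + 1)).map (fun r => if r < k then pvInitRow n r else (List.range (n + 1)).map (fun _ => (0 : Int))))
    = (List.range (m + 1)).map (fun r => pvInitRow n r) := by
  intro c
  induction c with
  | zero =>
    intro k hk
    simp only [List.range'_zero, List.foldl_nil]
    apply List.map_congr_left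
    intro x hx
    rw [List.mem_range] at hx
    simp [show x < k by omega]
  | succ c ih =>
    intro k hk
    rw [List.range'_succ, List.foldl_cons]
    rw [pvGetD_map_range _ _ _ _ (by omega)]
    rw [if_neg (by omega)]
    rw [pvSet_map_range _ _ _ _ (by omega)]
    rw [pvSet_map_range _ _ _ _ (by omega)]
    have : ((List.range (m + 1)).map fun x =>
        if x = k then (List.range (n + 1)).map (fun j => if j = 0 then (k : Int) else 0)
        else if x < k then pvInitRow n x else (List.range (n + 1)).map (fun _ => (0 : Int)))
      = (List.range (m + 1)).map (fun r => if r < k + 1 then pvInitRow n r else (List.range (n + 1)).map (fun _ => (0 : Int))) := by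
      apply List.map_congr_left
      intro x hx
      by_cases h1 : x = k
      · subst h1; simp [pvInitRow]
      · by_cases h2 : x < k <;> simp [h1, h2] <;> omega
    rw [this, ih (k + 1) (by omega)]

lemma pvPhase3 (s t : List Char) : ∀ c k, k + c = t.length + 1 →
    (List.range' k c).foldl (fun mat j => mat.set 0 ((mat.getD 0 []).set j (j : Int)))
      ((List.range (s.length + 1)).map
        (fun r => if r = 0 then (List.range (t.length + 1)).map (fun j => if j < k then (j : Int) else 0)
                  else pvInitRow t.length r))
    = pvMatA s t 0 := by
  intro c
  induction c with
  | zero =>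
    intro k hk
    simp only [List.range'_zero, List.foldl_nil, pvMatA]
    apply List.map_congr_left
    intro x hx
    rw [List.mem_range] at hx
    by_cases h1 : x = 0
    · subst h1
      simp only [Nat.le_zero]
      apply List.map_congr_left
      intro j hj
      rw [List.mem_range] at hj
      rw [if_pos (by omega), pvLev_zero_left]
    · simp [h1, show ¬ x ≤ 0 by omega]
  | succ c ih =>
    intro k hk
    rw [List.range'_succ, List.foldl_cons]
    rw [pvGetD_map_range _ _ _ _ (by omega)]
    rw [if_pos rfl]
    rw [pvSet_map_range _ _ _ _ (by omega)]
    rw [pvSet_map_range _ _ _ _ (by omega)]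
    have : ((List.range (s.length + 1)).map fun x =>
        if x = 0 then (List.range (t.length + 1)).map (fun j => if j = k then (k : Int) else if j < k then (j : Int) else 0)
        else if x = 0 then (List.range (t.length + 1)).map (fun j => if j < k then (j : Int) else 0)
        else pvInitRow t.length x)
      = (List.range (s.length + 1)).map
          (fun r => if r = 0 then (List.range (t.length + 1)).map (fun j => if j < k + 1 then (j : Int) else 0)
                    else pvInitRow t.length r) := by
      apply List.map_congr_left
      intro x hx
      by_cases h1 : x = 0
      · subst h1
        simp only [reduceIte]
        apply List.map_congr_left
        intro j hj
        by_cases h2 : j = k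
        · subst h2; simp
        · by_cases h3 : j < k <;> simp [h2, h3] <;> omega
      · simp [h1]
    rw [this, ih (k + 1) (by omega)]

lemma pvInnerA_loop (s t : List Char) (i : Nat) (hi1 : 1 ≤ i) (him : i ≤ s.length) :
    ∀ c j0, 1 ≤ j0 → j0 + c = t.length + 1 →
    (List.range' j0 c).foldl
      (fun mat j =>
        mat.set i ((mat.getD i []).set j
          (min (min ((mat.getD (i - 1) []).getD j 0 + 1)
                    ((mat.getD i []).getD (j - 1) 0 + 1))
               ((mat.getD (i - 1) []).getD (j - 1) 0 +
                 (if s.getD (i - 1) ' ' == t.getD (j - 1) ' ' then 0 else 1)))))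
      (pvInnerA s t i (j0 - 1))
    = pvInnerA s t i t.length := by
  intro c
  induction c with
  | zero =>
    intro j0 hj0 hk
    simp only [List.range'_zero, List.foldl_nil]
    rw [show j0 - 1 = t.length by omega]
  | succ c ih =>
    intro j0 hj0 hk
    obtain ⟨k, rfl⟩ : ∃ k, j0 = k + 1 := ⟨j0 - 1, by omega⟩
    rw [List.range'_succ, List.foldl_cons]
    have hgi : (pvInnerA s t i (k + 1 - 1)).getD i [] = pvRowA s t i k := by
      rw [pvInnerA, pvGetD_map_range _ _ _ _ (by omega)]
      simp
    have hgi1 : (pvInnerA s t i (k + 1 - 1)).getD (i - 1) [] = (List.range (t.length + 1)).map (pvLev s t (i - 1)) := by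
      rw [pvInnerA, pvGetD_map_range _ _ _ _ (by omega)]
      rw [if_pos (by omega)]
    rw [hgi, hgi1]
    have hup : ((List.range (t.length + 1)).map (pvLev s t (i - 1))).getD (k + 1) 0 = pvLev s t (i - 1) (k + 1) :=
      pvGetD_map_range _ _ _ _ (by omega)
    have hdiag : ((List.range (t.length + 1)).map (pvLev s t (i - 1))).getD (k + 1 - 1) 0 = pvLev s t (i - 1) k := by
      rw [show k + 1 - 1 = k from rfl]
      exact pvGetD_map_range _ _ _ _ (by omega)
    have hleft : (pvRowA s t i k).getD (k + 1 - 1) 0 = pvLev s t i k := by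
      rw [show k + 1 - 1 = k from rfl, pvRowA, pvGetD_map_range _ _ _ _ (by omega)]
      simp
    rw [hup, hdiag, hleft]
    have hval : min (min (pvLev s t (i - 1) (k + 1) + 1) (pvLev s t i k + 1))
          (pvLev s t (i - 1) k + (if s.getD (i - 1) ' ' == t.getD (k + 1 - 1) ' ' then 0 else 1))
        = pvLev s t i (k + 1) := by
      obtain ⟨i', rfl⟩ : ∃ i', i = i' + 1 := ⟨i - 1, by omega⟩
      rw [pvLev_succ]
      simp
    have hrow : (pvRowA s t i k).set (k + 1) (pvLev s t i (k + 1)) = pvRowA s t i (k + 1) := by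
      rw [pvRowA, pvSet_map_range _ _ _ _ (by omega), pvRowA]
      apply List.map_congr_left
      intro j hj
      by_cases h1 : j = k + 1
      · simp [h1]
      · by_cases h2 : j ≤ k <;> simp [h1, h2] <;> omega
    rw [hval, hrow]
    have hmat : (pvInnerA s t i (k + 1 - 1)).set i (pvRowA s t i (k + 1)) = pvInnerA s t i (k + 1) := by
      rw [pvInnerA, pvSet_map_range _ _ _ _ (by omega), pvInnerA]
      apply List.map_congr_left
      intro x hx
      by_cases h1 : x = i
      · simp [h1]
      · simp [h1]
    rw [hmat]
    have := ih (k + 2) (by omega) (by omega)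
    rwa [show k + 2 - 1 = k + 1 from rfl] at this

lemma pvInnerA_start (s t : List Char) (i : Nat) (hi1 : 1 ≤ i) :
    pvMatA s t (i - 1) = pvInnerA s t i 0 := by
  rw [pvMatA, pvInnerA]
  apply List.map_congr_left
  intro x hx
  by_cases h1 : x < i
  · rw [if_pos (by omega), if_pos h1]
  · rw [if_neg (by omega), if_neg h1]
    by_cases h2 : x = i
    · rw [if_pos h2, h2, pvRowA, pvInitRow]
      apply List.map_congr_left
      intro j hj
      by_cases h3 : j = 0
      · rw [h3]; simp [pvLev_zero_right]
      · rw [if_neg (show ¬ j ≤ 0 by omega), if_neg h3]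
    · rw [if_neg h2]

lemma pvInnerA_end (s t : List Char) (i : Nat) :
    pvInnerA s t i t.length = pvMatA s t i := by
  rw [pvMatA, pvInnerA]
  apply List.map_congr_left
  intro x hx
  by_cases h1 : x < i
  · rw [if_pos h1, if_pos (by omega)]
  · by_cases h2 : x = i
    · rw [if_neg h1, if_pos h2, h2, if_pos le_rfl, pvRowA]
      apply List.map_congr_left
      intro j hj
      rw [List.mem_range] at hj
      rw [if_pos (by omega)]
    · rw [if_neg h1, if_neg h2, if_neg (by omega)]

lemma pvOuterA (s t : List Char) : ∀ c k, 1 ≤ k → k + c = s.length + 1 →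
    (List.range' k c).foldl
      (fun mat i =>
        (List.range' 1 t.length).foldl
          (fun mat j =>
            mat.set i ((mat.getD i []).set j
              (min (min ((mat.getD (i - 1) []).getD j 0 + 1)
                        ((mat.getD i []).getD (j - 1) 0 + 1))
                   ((mat.getD (i - 1) []).getD (j - 1) 0 +
                     (if s.getD (i - 1) ' ' == t.getD (j - 1) ' ' then 0 else 1)))))
          mat)
      (pvMatA s t (k - 1))
    = pvMatA s t s.length := by
  intro c
  induction c with
  | zero =>
    intro k hk1 hk
    simp only [List.range'_zero, List.foldl_nil]
    rw [show k - 1 = s.length by omega]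
  | succ c ih =>
    intro k hk1 hk
    rw [List.range'_succ, List.foldl_cons]
    rw [pvInnerA_start s t k hk1]
    have hloop := pvInnerA_loop s t k hk1 (by omega) t.length 1 (by omega) (by omega)
    rw [show (1 : Nat) - 1 = 0 from rfl] at hloop
    rw [hloop, pvInnerA_end]
    have := ih (k + 1) (by omega) (by omega)
    rwa [show k + 1 - 1 = k from rfl] at this

lemma pvLevMatrix_eq (s t : List Char) : pvLevMatrix s t = pvLev s t s.length t.length := by
  simp only [pvLevMatrix]
  have h1 : List.foldl (fun mat i => mat.set i (List.map (fun x => (0 : Int)) (List.range (t.length + 1))))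
      (List.map (fun x => ([] : List Int)) (List.range (s.length + 1))) (List.range (s.length + 1))
      = (List.range (s.length + 1)).map (fun _ => (List.range (t.length + 1)).map (fun _ => (0 : Int))) := by
    have key : ∀ (L : List Nat), L = List.range' 0 (s.length + 1) →
        List.foldl (fun mat i => mat.set i (List.map (fun x => (0 : Int)) (List.range (t.length + 1))))
          (List.map (fun x => ([] : List Int)) (List.range (s.length + 1))) L
        = (List.range (s.length + 1)).map (fun _ => (List.range (t.length + 1)).map (fun _ => (0 : Int))) := by
      intro L hL
      rw [hL]
      have hs : (List.map (fun x => ([] : List Int)) (List.range (s.length + 1)))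
          = (List.range (s.length + 1)).map
              (fun r => if r < 0 then (List.range (t.length + 1)).map (fun _ => (0 : Int)) else ([] : List Int)) :=
        List.map_congr_left (fun x _ => by simp)
      rw [hs]
      exact pvPhase1 s.length t.length (s.length + 1) 0 (by omega)
    exact key _ List.range_eq_range'
  rw [h1]
  have h2 : List.foldl (fun mat i => mat.set i ((mat.getD i []).set 0 (i : Int)))
      ((List.range (s.length + 1)).map (fun _ => (List.range (t.length + 1)).map (fun _ => (0 : Int))))
      (List.range (s.length + 1))
      = (List.range (s.length + 1)).map (fun r => pvInitRow t.length r) := by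
    have key : ∀ (L : List Nat), L = List.range' 0 (s.length + 1) →
        List.foldl (fun mat i => mat.set i ((mat.getD i []).set 0 (i : Int)))
          ((List.range (s.length + 1)).map (fun _ => (List.range (t.length + 1)).map (fun _ => (0 : Int)))) L
        = (List.range (s.length + 1)).map (fun r => pvInitRow t.length r) := by
      intro L hL
      rw [hL]
      have hs : ((List.range (s.length + 1)).map (fun _ => (List.range (t.length + 1)).map (fun _ => (0 : Int))))
          = (List.range (s.length + 1)).map
              (fun r => if r < 0 then pvInitRow t.length r else (List.range (t.length + 1)).map (fun _ => (0 : Int))) :=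
        List.map_congr_left (fun x _ => by simp)
      rw [hs]
      exact pvPhase2 s.length t.length (s.length + 1) 0 (by omega)
    exact key _ List.range_eq_range'
  rw [h2]
  have h3 : List.foldl (fun mat j => mat.set 0 ((mat.getD 0 []).set j (j : Int)))
      ((List.range (s.length + 1)).map (fun r => pvInitRow t.length r)) (List.range (t.length + 1))
      = pvMatA s t 0 := by
    have key : ∀ (L : List Nat), L = List.range' 0 (t.length + 1) →
        List.foldl (fun mat j => mat.set 0 ((mat.getD 0 []).set j (j : Int)))
          ((List.range (s.length + 1)).map (fun r => pvInitRow t.length r)) L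
        = pvMatA s t 0 := by
      intro L hL
      rw [hL]
      have hs : ((List.range (s.length + 1)).map (fun r => pvInitRow t.length r))
          = (List.range (s.length + 1)).map
              (fun r => if r = 0 then (List.range (t.length + 1)).map (fun (j : Nat) => if j < 0 then (j : Int) else 0)
                        else pvInitRow t.length r) := by
        apply List.map_congr_left
        intro x hx
        by_cases hx0 : x = 0
        · subst hx0
          rw [if_pos rfl, pvInitRow]
          apply List.map_congr_left
          intro j hj
          rw [if_neg (Nat.not_lt_zero j)]
          by_cases hj0 : j = 0 <;> simp [hj0]
        · rw [if_neg hx0]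
      rw [hs]
      exact pvPhase3 s t (t.length + 1) 0 (by omega)
    exact key _ List.range_eq_range'
  rw [h3]
  have h4 := pvOuterA s t s.length 1 (by omega) (by omega)
  rw [show (1 : Nat) - 1 = 0 from rfl] at h4
  rw [h4]
  rw [pvMatA, pvGetD_map_range _ _ _ _ (by omega), if_pos le_rfl,
    pvGetD_map_range _ _ _ _ (by omega)]

-- ---------- B side ----------
-- property of the dict holding diagonal d
def pvDiagP (s t : List Char) (d : Nat) (dic : PySem.Dict Nat Int) : Prop :=
  ∀ i, d - t.length ≤ i → i ≤ min d s.length → dic.getD i 0 = pvLev s t i (d - i)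

-- one diagonal step: the freshly built dict holds diagonal d
lemma pvCurB (s t : List Char) (p2 p1 : PySem.Dict Nat Int) (d : Nat)
    (_hd : d ≤ s.length + t.length)
    (hp1 : 1 ≤ d → pvDiagP s t (d - 1) p1)
    (hp2 : 2 ≤ d → pvDiagP s t (d - 2) p2) :
    pvDiagP s t d
      (List.foldl
        (fun cur i =>
          if i = 0 then cur.insert i ((d - i : Nat) : Int)
          else
            if d - i = 0 then cur.insert i ((i : Nat) : Int)
            else
              cur.insert i
                (min (min (p1.getD (i - 1) 0 + 1) (p1.getD i 0 + 1))
                  (p2.getD (i - 1) 0 +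
                    if s.getD (i - 1) ' ' == t.getD (d - i - 1) ' ' then 0 else 1)))
        PySem.Dict.empty (List.range' (d - t.length) (min d s.length + 1 - (d - t.length)))) := by
  set V : Nat → Int := fun i =>
    if i = 0 then ((d - i : Nat) : Int)
    else if d - i = 0 then ((i : Nat) : Int)
    else min (min (p1.getD (i - 1) 0 + 1) (p1.getD i 0 + 1))
      (p2.getD (i - 1) 0 + if s.getD (i - 1) ' ' == t.getD (d - i - 1) ' ' then 0 else 1) with hV
  have hstep : (fun (cur : PySem.Dict Nat Int) i =>
      if i = 0 then cur.insert i ((d - i : Nat) : Int)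
      else
        if d - i = 0 then cur.insert i ((i : Nat) : Int)
        else
          cur.insert i
            (min (min (p1.getD (i - 1) 0 + 1) (p1.getD i 0 + 1))
              (p2.getD (i - 1) 0 +
                if s.getD (i - 1) ' ' == t.getD (d - i - 1) ' ' then 0 else 1)))
      = fun cur i => cur.insert i (V i) := by
    funext cur i
    by_cases h0 : i = 0
    · simp [h0, hV]
    · by_cases hj : d - i = 0 <;> simp [h0, hj, hV]
  rw [hstep]
  set l : List Nat := List.range' (d - t.length) (min d s.length + 1 - (d - t.length)) with hl
  have hitems : (List.foldl (fun cur i => cur.insert i (V i)) PySem.Dict.empty l).items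
      = PySem.Dict.empty.items ++ l.map (fun a => (a, V a)) := by
    apply PySem.Dict.items_foldl_insert_fresh
    · intro a ha
      exact PySem.Dict.contains_empty a
    · rw [List.map_id']
      exact List.nodup_range'
  intro i hlo hhi
  have hemp : (PySem.Dict.empty : PySem.Dict Nat Int).items = [] := rfl
  have hmem : i ∈ l := by
    rw [hl]
    exact List.mem_range'_1.mpr (by omega)
  have hfst : ∀ (xs : List Nat), (xs.map (fun a => (a, V a))).map (fun p => p.1) = xs := by
    intro xs
    induction xs with
    | nil => rfl
    | cons x xs ih => simp [ih]
  have hkeys : (List.foldl (fun cur i => cur.insert i (V i)) PySem.Dict.empty l).keys = l := by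
    simp only [PySem.Dict.keys, hitems, hemp, List.nil_append]
    exact hfst l
  have hnd : (List.foldl (fun cur i => cur.insert i (V i)) PySem.Dict.empty l).keys.Nodup := by
    rw [hkeys]
    exact List.nodup_range'
  have hg : (List.foldl (fun cur i => cur.insert i (V i)) PySem.Dict.empty l).getD i 0 = V i := by
    refine PySem.Dict.getD_of_mem_items _ ?_ hnd 0
    rw [hitems, hemp, List.nil_append]
    exact List.mem_map.mpr ⟨i, hmem, rfl⟩
  rw [hg]
  simp only [hV]
  by_cases h0 : i = 0
  · subst h0
    simp [pvLev_zero_left]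
  · by_cases hj : d - i = 0
    · rw [if_neg h0, if_pos hj, hj, pvLev_zero_right]
    · rw [if_neg h0, if_neg hj]
      have hd1 : 1 ≤ d := by omega
      have hd2 : 2 ≤ d := by omega
      have e1 : p1.getD (i - 1) 0 = pvLev s t (i - 1) ((d - 1) - (i - 1)) :=
        hp1 hd1 (i - 1) (by omega) (by omega)
      have e2 : p1.getD i 0 = pvLev s t i ((d - 1) - i) :=
        hp1 hd1 i (by omega) (by omega)
      have e3 : p2.getD (i - 1) 0 = pvLev s t (i - 1) ((d - 2) - (i - 1)) :=
        hp2 hd2 (i - 1) (by omega) (by omega)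
      rw [e1, e2, e3]
      obtain ⟨i', rfl⟩ : ∃ i', i = i' + 1 := ⟨i - 1, by omega⟩
      obtain ⟨j', hj'⟩ : ∃ j', d - (i' + 1) = j' + 1 := ⟨d - (i' + 1) - 1, by omega⟩
      rw [hj', pvLev_succ]
      have r1 : (d - 1) - (i' + 1 - 1) = j' + 1 := by omega
      have r2 : (d - 1) - (i' + 1) = j' := by omega
      have r3 : (d - 2) - (i' + 1 - 1) = j' := by omega
      have r4 : i' + 1 - 1 = i' := by omega
      rw [r1, r2, r3, r4]
      rfl

lemma pvOuterB (s t : List Char) : ∀ c k, k + c = s.length + t.length + 1 →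
    ∀ (p2 p1 : PySem.Dict Nat Int),
    (1 ≤ k → pvDiagP s t (k - 1) p1) → (2 ≤ k → pvDiagP s t (k - 2) p2) →
    pvDiagP s t (s.length + t.length)
      ((List.foldl
        (fun (st : PySem.Dict Nat Int × PySem.Dict Nat Int) d =>
          (st.2,
            List.foldl
              (fun cur i =>
                if i = 0 then cur.insert i ((d - i : Nat) : Int)
                else
                  if d - i = 0 then cur.insert i ((i : Nat) : Int)
                  else
                    cur.insert i
                      (min (min (st.2.getD (i - 1) 0 + 1) (st.2.getD i 0 + 1))
                        (st.1.getD (i - 1) 0 +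
                          if s.getD (i - 1) ' ' == t.getD (d - i - 1) ' ' then 0 else 1)))
              PySem.Dict.empty (List.range' (d - t.length) (min d s.length + 1 - (d - t.length)))))
        (p2, p1) (List.range' k c)).2) := by
  intro c
  induction c with
  | zero =>
    intro k hk p2 p1 hp1 hp2
    simp only [List.range'_zero, List.foldl_nil]
    have := hp1 (by omega)
    rwa [show k - 1 = s.length + t.length by omega] at this
  | succ c ih =>
    intro k hk p2 p1 hp1 hp2
    rw [List.range'_succ, List.foldl_cons]
    apply ih (k + 1) (by omega)
    · intro _
      rw [show k + 1 - 1 = k from rfl]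
      exact pvCurB s t p2 p1 k (by omega) (fun h => hp1 h) (fun h => hp2 h)
    · intro h2
      rw [show k + 1 - 2 = k - 1 by omega]
      exact hp1 (by omega)

lemma pvLevDiag_eq (s t : List Char) : pvLevDiag s t = pvLev s t s.length t.length := by
  simp only [pvLevDiag]
  rw [List.range_eq_range']
  have key := pvOuterB s t (s.length + t.length + 1) 0 (by omega) PySem.Dict.empty PySem.Dict.empty
    (fun h => absurd h (by omega)) (fun h => absurd h (by omega))
  have := key s.length (by omega) (by omega)
  rwa [show s.length + t.length - s.length = t.length by omega] at this

-- ---------- assembly ----------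

lemma calc_eq (input_sentence : String) (questions_set : List String) :
    calculate_lev_distance input_sentence questions_set
      = calculate_lev_distance_alt input_sentence questions_set := by
  rw [calculate_lev_distance, calculate_lev_distance_alt]
  have hfun : (fun (similarities : List Int) question =>
      if input_sentence == question then similarities ++ [(0 : Int)]
      else similarities ++ [pvLevMatrix input_sentence.toList question.toList])
    = fun similarities question => similarities ++
        [if input_sentence == question then (0 : Int)
         else pvLevMatrix input_sentence.toList question.toList] := by
    funext acc q
    by_cases h : input_sentence == q <;> simp [h]
  rw [hfun, PySem.List.foldl_append_singleton_eq_map, List.nil_append]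
  apply List.map_congr_left
  intro q hq
  by_cases h : input_sentence == q
  · rw [if_pos h]
    have hq : input_sentence = q := by exact eq_of_beq h
    rw [← hq, pvLevDiag_eq, pvLev_self]
  · rw [if_neg h, pvLevMatrix_eq, pvLevDiag_eq]

-- ===== VERDICT (by name: the statement is the Claim_ definition above) =====
theorem calculate_lev_distance_spec : Claim_equal_calculate_lev_distance := by
  intro input_sentence questions_set _
  unfold Spec_calculate_lev_distance
  exact calc_eq input_sentence questions_set
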